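-- pv_equiv track=rewrite | github.com/VTomar88/KnowYourNeighbor | zip/lib/python3.10/site-packages/sqlalchemy_mate/utils.py | grouper_list
-- ===== SOURCE A (Python) =====
-- from typing import Type, Union, Tuple, Dict, Iterable
--
-- def grouper_list(l: Iterable, n: int) -> Iterable[list]:
--     """Evenly divide list into fixed-length piece, no filled value if chunk
--     size smaller than fixed-length.
--
--     Example::
--
--         >>> list(grouper(range(10), n=3)
--         [[0, 1, 2], [3, 4, 5], [6, 7, 8], [9]]
--
--     **中文文档**
--
--     将一个列表按照尺寸n, 依次打包输出, 有多少输出多少, 并不强制填充包的大小到n。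
--
--     下列实现是按照性能从高到低进行排列的:
--
--     - 方法1: 建立一个counter, 在向chunk中添加元素时, 同时将counter与n比较, 如果一致
--       则yield。然后在最后将剩余的item视情况yield。
--     - 方法2: 建立一个list, 每次添加一个元素, 并检查size。
--     - 方法3: 调用grouper()函数, 然后对里面的None元素进行清理。
--     """
--     chunk = list()
--     counter = 0
--     for item in l:
--         counter += 1
--         chunk.append(item)
--         if counter == n:
--             yield chunk
--             chunk = list()
--             counter = 0
--     if len(chunk) > 0:
--         yield chunk
-- ===== SOURCE B (Python) =====
-- def grouper_list(l, n):
--     it = iter(l)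
--     while True:
--         chunk = []
--         for _ in range(n):
--             try:
--                 chunk.append(next(it))
--             except StopIteration:
--                 break
--         if not chunk:
--             return
--         yield chunk
-- ===== Notes on version B (the rewrite author's own statement) =====
-- stated objective: idiomatic
-- what changed: Replaces the per-element append/counter/reset loop and trailing remainder guard with repeated extraction of up-to-n items from an explicit iterator, yielding each non-empty batch until the iterator is exhausted.
-- intended difference: For a non-positive chunk size n with a non-empty input, A's counter never hits n so its leftover loop state makes it yield the entire input as one chunk, while B yields nothing; yielding no chunks is the intended behaviour for a meaningless chunk size. — e.g. on grouper_list([1], 0): A returns [[1]], B returns []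
import Mathlib
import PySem

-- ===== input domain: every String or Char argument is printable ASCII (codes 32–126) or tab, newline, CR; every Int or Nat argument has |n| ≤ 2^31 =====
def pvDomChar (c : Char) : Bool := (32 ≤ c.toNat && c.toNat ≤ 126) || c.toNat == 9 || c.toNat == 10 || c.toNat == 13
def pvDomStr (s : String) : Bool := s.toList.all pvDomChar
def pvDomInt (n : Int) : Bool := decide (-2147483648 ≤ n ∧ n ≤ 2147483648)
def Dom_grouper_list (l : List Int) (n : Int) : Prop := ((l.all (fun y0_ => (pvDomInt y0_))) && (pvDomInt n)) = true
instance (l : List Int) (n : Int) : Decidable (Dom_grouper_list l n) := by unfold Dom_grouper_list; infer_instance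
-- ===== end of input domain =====

-- B chunks via repeated take-n from an explicit iterator instead of A's per-element counter/reset loop (idiomatic decomposition; same cost).
-- Both Pythons are generators; equivalence is about the list of yielded chunks.

-- ===== PORT A =====
-- loop body of A's for-loop: counter += 1; chunk.append(item); if counter == n: yield chunk; reset
def stepA (n : Int) (st : List Int × Int × List (List Int)) (item : Int) :
    List Int × Int × List (List Int) :=
  let chunk := st.1 ++ [item]
  let counter := st.2.1 + 1
  if counter = n then (([] : List Int), (0 : Int), st.2.2 ++ [chunk])
  else (chunk, counter, st.2.2)

def grouper_list (l : List Int) (n : Int) : List (List Int) :=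
  let s := l.foldl (stepA n) (([] : List Int), (0 : Int), ([] : List (List Int)))
  if s.1.length > 0 then s.2.2 ++ [s.1] else s.2.2

-- ===== PORT B =====
-- the while-loop of B once n ≥ 1 is known: grab up to (m+1) items; stop when the grab is empty
def chunksB (m : Nat) : List Int → List (List Int)
  | [] => []
  | a :: rest => ((a :: rest).take (m + 1)) :: chunksB m ((a :: rest).drop (m + 1))
  termination_by l => l.length
  decreasing_by simp

def grouper_list_alt (l : List Int) (n : Int) : List (List Int) :=
  -- for n ≤ 0 the inner for-loop of B grabs nothing, so the first chunk is empty and B stops at once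
  if n ≤ 0 then [] else chunksB (n.toNat - 1) l

-- ===== PRECONDITION & SPEC =====
-- On n ≤ 0 with l ≠ [], A's counter never equals n, so leftover loop state makes A yield the whole
-- input as one chunk, while B yields nothing — the intended result for a meaningless chunk size.
def D_grouper_list (l : List Int) (n : Int) : Prop := n ≤ 0 ∧ l ≠ []
instance (l : List Int) (n : Int) : Decidable (D_grouper_list l n) := by unfold D_grouper_list; infer_instance

def Spec_grouper_list (l : List Int) (n : Int) (out : List (List Int)) : Prop :=
  ¬ D_grouper_list l n → out = grouper_list_alt l n
instance (l : List Int) (n : Int) (out : List (List Int)) : Decidable (Spec_grouper_list l n out) := by unfold Spec_grouper_list; infer_instance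

def pvDiffWitness_grouper_list : List Int × Int := ([1], 0)
def pvDiffWitnessOut_grouper_list : (List (List Int)) × (List (List Int)) := ([[1]], [])

-- ===== CLAIM (what is proved, stated in full; the proofs are below) =====
def Claim_unchanged_grouper_list : Prop := ∀ (l : List Int) (n : Int), Dom_grouper_list l n → Spec_grouper_list l n (grouper_list l n)
def Claim_changed_grouper_list : Prop := Dom_grouper_list (pvDiffWitness_grouper_list.1) (pvDiffWitness_grouper_list.2) ∧ D_grouper_list (pvDiffWitness_grouper_list.1) (pvDiffWitness_grouper_list.2) ∧ grouper_list (pvDiffWitness_grouper_list.1) (pvDiffWitness_grouper_list.2) = pvDiffWitnessOut_grouper_list.1 ∧ grouper_list_alt (pvDiffWitness_grouper_list.1) (pvDiffWitness_grouper_list.2) = pvDiffWitnessOut_grouper_list.2 ∧ pvDiffWitnessOut_grouper_list.1 ≠ pvDiffWitnessOut_grouper_list.2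
def Claim_exact_grouper_list : Prop := ∀ (l : List Int) (n : Int), Dom_grouper_list l n → D_grouper_list l n → grouper_list l n ≠ grouper_list_alt l n

-- ===== LEMMAS AND PROOFS =====

lemma chunksB_nil (m : Nat) : chunksB m [] = [] := by rw [chunksB]

lemma chunksB_cons (m : Nat) (a : Int) (t : List Int) :
    chunksB m (a :: t) = ((a :: t).take (m + 1)) :: chunksB m ((a :: t).drop (m + 1)) := by
  rw [chunksB]

def finalizeA (s : List Int × Int × List (List Int)) : List (List Int) :=
  if s.1.length > 0 then s.2.2 ++ [s.1] else s.2.2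

-- main invariant: a partial chunk in A's state behaves like that chunk prefixed to the rest of input
lemma foldA_chunks (n : Int) (hn : 1 ≤ n) :
    ∀ (l chunk : List Int) (acc : List (List Int)), chunk.length < n.toNat →
      finalizeA (l.foldl (stepA n) (chunk, (chunk.length : Int), acc)) =
        acc ++ chunksB (n.toNat - 1) (chunk ++ l) := by
  intro l
  induction l with
  | nil =>
    intro chunk acc hlen
    cases chunk with
    | nil => simp [finalizeA, chunksB_nil]
    | cons a t =>
      have htake : ((a :: t)).take (n.toNat - 1 + 1) = a :: t := by
        apply List.take_of_length_le; omega
      have hdrop : ((a :: t)).drop (n.toNat - 1 + 1) = [] := by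
        apply List.drop_eq_nil_of_le; omega
      simp [finalizeA, chunksB_cons, htake, hdrop, chunksB_nil]
  | cons item rest ih =>
    intro chunk acc hlen
    simp only [List.foldl_cons]
    by_cases h : (chunk.length : Int) + 1 = n
    · have hlen1 : (chunk ++ [item]).length = n.toNat := by
        simp; omega
      have hstep : stepA n (chunk, (chunk.length : Int), acc) item =
          (([] : List Int), (0 : Int), acc ++ [chunk ++ [item]]) := by
        simp [stepA, h]
      rw [hstep]
      have ih0 := ih ([]) (acc ++ [chunk ++ [item]]) (by simp; omega)
      simp only [List.length_nil, Int.natCast_zero] at ih0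
      rw [ih0]
      have htake : ((chunk ++ item :: rest)).take (n.toNat - 1 + 1) = chunk ++ [item] := by
        have : chunk ++ item :: rest = (chunk ++ [item]) ++ rest := by simp
        rw [this, List.take_append_of_le_length (by omega), List.take_of_length_le (by omega)]
      have hdrop : ((chunk ++ item :: rest)).drop (n.toNat - 1 + 1) = rest := by
        have : chunk ++ item :: rest = (chunk ++ [item]) ++ rest := by simp
        rw [this, List.drop_append_of_le_length (by omega)]
        simp [hlen1]
        omega
      cases hc : chunk ++ item :: rest with
      | nil => simp at hc
      | cons b bs =>
        rw [← hc]
        conv_rhs => rw [show chunk ++ item :: rest = b :: bs from hc]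
        rw [chunksB_cons, ← hc, htake, hdrop]
        simp
  -- second branch
    · have hstep : stepA n (chunk, (chunk.length : Int), acc) item =
          (chunk ++ [item], (chunk.length : Int) + 1, acc) := by
        simp [stepA, h]
      rw [hstep]
      have hlt : (chunk ++ [item]).length < n.toNat := by
        simp; omega
      have hcast : ((chunk.length : Int) + 1) = (((chunk ++ [item]).length : Nat) : Int) := by
        simp
      rw [hcast]
      rw [ih (chunk ++ [item]) acc hlt]
      simp

lemma foldA_nonpos (n : Int) (hn : n ≤ 0) :
    ∀ (l chunk : List Int) (c : Int) (acc : List (List Int)), 0 ≤ c →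
      l.foldl (stepA n) (chunk, c, acc) = (chunk ++ l, c + l.length, acc) := by
  intro l
  induction l with
  | nil => intro chunk c acc hc; simp
  | cons a rest ih =>
    intro chunk c acc hc
    have hne : ¬ (c + 1 = n) := by omega
    simp only [List.foldl_cons, stepA, hne, if_false]
    rw [ih (chunk ++ [a]) (c + 1) acc (by omega)]
    simp
    omega

lemma grouper_eq_whole (l : List Int) (n : Int) (hn : n ≤ 0) (hl : l ≠ []) :
    grouper_list l n = [l] := by
  unfold grouper_list
  rw [foldA_nonpos n hn l [] 0 [] (by omega)]
  simp
  intro h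
  exact absurd h hl

-- ===== VERDICT (by name: the statement is the Claim_ definition above) =====
theorem grouper_list_spec : Claim_unchanged_grouper_list := by
  intro l n _ hD
  by_cases hn : n ≤ 0
  · have hl : l = [] := by
      by_contra hne
      exact hD ⟨hn, hne⟩
    subst hl
    simp [grouper_list, grouper_list_alt, hn]
  · have h1 : 1 ≤ n := by omega
    have key := foldA_chunks n h1 l [] [] (by simp; omega)
    simp only [List.length_nil, Int.natCast_zero, List.nil_append] at key
    unfold finalizeA at key
    have halt : grouper_list_alt l n = chunksB (n.toNat - 1) l := by
      unfold grouper_list_alt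
      rw [if_neg (by omega)]
    rw [halt]
    exact key

theorem grouper_list_changed : Claim_changed_grouper_list := by unfold Claim_changed_grouper_list; decide

theorem grouper_list_tight : Claim_exact_grouper_list := by
  intro l n _ hD
  rw [grouper_eq_whole l n hD.1 hD.2]
  unfold grouper_list_alt
  rw [if_pos hD.1]
  simp
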